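-- pv_equiv track=rewrite | github.com/carlyhall4/TicTacToe | Tic_Tac_Toe.py | GetNumberOfChessPieces
-- ===== SOURCE A (Python) =====
-- def GetNumberOfChessPieces(Board):
--     totalnumber=0
--     for i in range(0,3):
--         for j in range(0,3):
--             if Board[i][j]!= ' ':
--                 totalnumber+=1
--
--     return totalnumber
--
--     '''
--     Parameters: Board is the game board, a 3x3 matrix
--     Return: the number of chess piceces on Board
--             i.e. the total number of 'X' and 'O'
--     hint: define a counter and use a nested for loop, like this
--           for i in 0 to 3
--               for j in 0 to 3
--                   add one to the counter if Board[i][j] is not empty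
--     '''
-- ===== SOURCE B (Python) =====
-- def GetNumberOfChessPieces(Board):
--     # recursive decomposition: count a row's first three cells recursively,
--     # then recurse over the three rows, summing as the recursion unwinds
--     def count_cols(row, j):
--         if j >= 3:
--             return 0
--         return (1 if row[j] != ' ' else 0) + count_cols(row, j + 1)
--
--     def count_rows(i):
--         if i >= 3:
--             return 0
--         return count_cols(Board[i], 0) + count_rows(i + 1)
--
--     return count_rows(0)
-- ===== Notes on version B (the rewrite author's own statement) =====
-- stated objective: alternative
-- what changed: Replaces the nested index loops with a mutable accumulator by two layered recursive helpers (recursion over the three columns nested in recursion over the three rows) that build the count as the recursion unwinds.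
import Mathlib
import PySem

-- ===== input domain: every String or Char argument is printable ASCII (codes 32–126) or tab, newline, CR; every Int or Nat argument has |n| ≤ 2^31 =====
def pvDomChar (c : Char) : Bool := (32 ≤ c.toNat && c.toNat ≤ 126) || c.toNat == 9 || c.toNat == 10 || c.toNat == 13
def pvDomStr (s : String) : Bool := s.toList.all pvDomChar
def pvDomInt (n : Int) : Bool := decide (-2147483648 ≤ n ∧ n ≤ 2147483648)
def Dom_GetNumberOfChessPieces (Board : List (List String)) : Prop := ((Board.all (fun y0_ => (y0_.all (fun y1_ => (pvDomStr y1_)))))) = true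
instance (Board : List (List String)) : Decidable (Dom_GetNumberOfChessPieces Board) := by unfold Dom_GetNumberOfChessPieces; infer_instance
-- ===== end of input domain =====

-- B counts recursively (a helper over the three columns, nested in a helper over the three rows) instead of A's nested index loops with a mutable accumulator (objective: alternative decomposition); not claimed faster.


-- ===== PORT A =====
def GetNumberOfChessPieces (Board : List (List String)) : Int :=
  (PySem.List.pyRange 0 3 1).foldl (fun totalnumber i =>
    (PySem.List.pyRange 0 3 1).foldl (fun totalnumber j =>
      if PySem.List.pyGetD (PySem.List.pyGetD Board i []) j " " ≠ " " then totalnumber + 1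
      else totalnumber) totalnumber) 0

-- ===== PORT B =====
-- indexing is exact on Pre_ (rows/cols in range, so pyGetD's default is never used; Python raises there, excluded by Pre_)
def bCountCols (row : List String) (j : Nat) : Int :=
  if j ≥ 3 then 0
  else (if PySem.List.pyGetD row (j : Int) " " ≠ " " then 1 else 0) + bCountCols row (j + 1)
termination_by 3 - j

def bCountRows (Board : List (List String)) (i : Nat) : Int :=
  if i ≥ 3 then 0
  else bCountCols (PySem.List.pyGetD Board (i : Int) []) 0 + bCountRows Board (i + 1)
termination_by 3 - i

def GetNumberOfChessPieces_alt (Board : List (List String)) : Int :=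
  bCountRows Board 0

-- ===== PRECONDITION & SPEC =====
-- Pre_ excludes exactly the inputs on which A raises IndexError: boards with fewer than
-- 3 rows, or whose first three rows have fewer than 3 cells (B raises there too).
def Pre_GetNumberOfChessPieces (Board : List (List String)) : Prop :=
  3 ≤ Board.length ∧ ∀ row ∈ Board.take 3, 3 ≤ row.length
instance (Board : List (List String)) : Decidable (Pre_GetNumberOfChessPieces Board) := by
  unfold Pre_GetNumberOfChessPieces; infer_instance
def pvWitness_GetNumberOfChessPieces : List (List String) :=
  [[" ", "X", "O"], ["X", " ", " "], ["O", "X", " "]]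
def Spec_GetNumberOfChessPieces (Board : List (List String)) (out : Int) : Prop := out = GetNumberOfChessPieces_alt Board
instance (Board : List (List String)) (out : Int) : Decidable (Spec_GetNumberOfChessPieces Board out) := by unfold Spec_GetNumberOfChessPieces; infer_instance

-- ===== CLAIM (what is proved, stated in full; the proofs are below) =====
def Claim_equal_GetNumberOfChessPieces : Prop := ∀ (Board : List (List String)), Dom_GetNumberOfChessPieces Board → Pre_GetNumberOfChessPieces Board → Spec_GetNumberOfChessPieces Board (GetNumberOfChessPieces Board)

-- ===== LEMMAS AND PROOFS =====

theorem bCountCols_eval (row : List String) :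
    bCountCols row 0 =
      (if PySem.List.pyGetD row 0 " " ≠ " " then (1:Int) else 0)
      + ((if PySem.List.pyGetD row 1 " " ≠ " " then (1:Int) else 0)
      + ((if PySem.List.pyGetD row 2 " " ≠ " " then (1:Int) else 0) + 0)) := by
  rw [bCountCols, bCountCols, bCountCols, bCountCols]
  norm_num

theorem bCountRows_eval (Board : List (List String)) :
    bCountRows Board 0 =
      bCountCols (PySem.List.pyGetD Board 0 []) 0
      + (bCountCols (PySem.List.pyGetD Board 1 []) 0
      + (bCountCols (PySem.List.pyGetD Board 2 []) 0 + 0)) := by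
  rw [bCountRows, bCountRows, bCountRows, bCountRows]
  norm_num

-- ===== VERDICT (by name: the statement is the Claim_ definition above) =====
set_option maxHeartbeats 1000000 in
theorem GetNumberOfChessPieces_spec : Claim_equal_GetNumberOfChessPieces := by
  intro Board _ _
  show GetNumberOfChessPieces Board = GetNumberOfChessPieces_alt Board
  have hr : PySem.List.pyRange 0 3 1 = [0, 1, 2] := by decide
  have hif : ∀ (x : String) (n : Int),
      (if x ≠ " " then n + 1 else n) = n + (if x ≠ " " then 1 else 0) := by
    intro x n; split <;> simp
  simp only [GetNumberOfChessPieces, GetNumberOfChessPieces_alt, hr, List.foldl,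
    bCountRows_eval, bCountCols_eval, hif]
  ring
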